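-- pv_equiv track=rewrite | github.com/bubble-boi/my-hypr-dot | waybar/scripts/clock-cal.py | join_blocks_grid
-- ===== SOURCE A (Python) =====
-- from typing import List
--
-- def join_blocks_grid(blocks: List[List[str]], cols: int, width: int, gap: int) -> List[str]:
--     out: List[str] = []
--     spacer = " " * gap
--
--     for r in range(0, len(blocks), cols):
--         row = blocks[r : r + cols]
--         max_h = max(len(b) for b in row)
--
--         for i in range(max_h):
--             parts = []
--             for b in row:
--                 s = b[i] if i < len(b) else ""
--                 parts.append(s.ljust(width))
--             out.append(spacer.join(parts))
--
--         out.append("")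
--
--     while out and out[-1] == "":
--         out.pop()
--
--     return out
-- ===== SOURCE B (Python) =====
-- from typing import List
--
--
-- def _pad_transpose(row: List[List[str]]) -> List[List[str]]:
--     """Padded transpose: peel the head line off every block until all blocks are exhausted."""
--     lines: List[List[str]] = []
--     while any(row):
--         lines.append([b[0] if b else "" for b in row])
--         row = [b[1:] for b in row]
--     return lines
--
--
-- def join_blocks_grid(blocks: List[List[str]], cols: int, width: int, gap: int) -> List[str]:
--     spacer = " " * gap
--     out: List[str] = []
--     for r in range(0, len(blocks), cols):
--         for parts in _pad_transpose(blocks[r : r + cols]):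
--             out.append(spacer.join(p.ljust(width) for p in parts))
--         out.append("")
--     while out and out[-1] == "":
--         out.pop()
--     return out
-- ===== Notes on version B (the rewrite author's own statement) =====
-- stated objective: alternative
-- what changed: Replaces the per-chunk max-height computation and positional index loop (i < len(b) fallback) with a padded transpose that repeatedly peels the head line off every block in the chunk until all blocks are exhausted.
import Mathlib
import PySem

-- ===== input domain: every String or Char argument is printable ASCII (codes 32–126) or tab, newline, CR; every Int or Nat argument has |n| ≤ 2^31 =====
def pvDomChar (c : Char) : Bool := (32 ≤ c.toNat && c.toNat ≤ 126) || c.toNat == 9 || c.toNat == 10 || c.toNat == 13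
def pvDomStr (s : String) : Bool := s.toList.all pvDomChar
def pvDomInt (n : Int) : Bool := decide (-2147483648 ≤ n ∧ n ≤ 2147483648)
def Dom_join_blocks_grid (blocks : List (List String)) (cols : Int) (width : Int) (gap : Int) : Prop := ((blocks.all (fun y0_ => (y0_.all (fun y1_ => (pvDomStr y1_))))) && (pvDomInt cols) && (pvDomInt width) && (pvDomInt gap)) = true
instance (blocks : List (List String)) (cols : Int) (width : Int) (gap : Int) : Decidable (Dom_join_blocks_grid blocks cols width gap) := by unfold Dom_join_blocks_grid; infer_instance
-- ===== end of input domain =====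

-- B replaces A's max-height + positional-index inner loop by a padded transpose of each chunk (alternative decomposition, same cost); no speed claim.

-- ===== PORT A =====
-- s.ljust(w): pad with spaces on the right up to width w (no-op if w ≤ len(s)); used verbatim by both Pythons.
def pyLjust (s : String) (w : Int) : String :=
  String.ofList (s.toList ++ List.replicate (w - PySem.Str.len s).toNat ' ')

-- " " * gap (empty for gap ≤ 0); identical line in both Pythons.
def spacerOf (gap : Int) : String := String.ofList (List.replicate gap.toNat ' ')

-- while out and out[-1] == "": out.pop()   (identical trailing-trim loop in both Pythons)
def trimTrail : List String → List String
  | [] => []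
  | x :: xs =>
    match trimTrail xs with
    | [] => if x = "" then [] else [x]
    | ys => x :: ys

def join_blocks_grid (blocks : List (List String)) (cols : Int) (width : Int) (gap : Int) : List String :=
  let spacer := spacerOf gap
  let out : List String :=
    (PySem.List.pyRange 0 (blocks.length : Int) cols).foldl (fun out r =>
      let row := PySem.List.slice blocks (some r) (some (r + cols))
      -- max(len(b) for b in row); the 'none' arm is unreachable (row is nonempty whenever the loop runs)
      let max_h : Int :=
        match PySem.List.max? (row.map (fun b => (b.length : Int))) (fun x => x) with
        | some m => m
        | none => 0
      let out := (PySem.List.pyRange 0 max_h 1).foldl (fun out i =>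
        out ++ [PySem.Str.join spacer (row.map (fun b =>
          pyLjust (if i < (b.length : Int) then PySem.List.pyGetD b i "" else "") width))]) out
      out ++ [""]) []
  trimTrail out

-- ===== PORT B =====
-- termination helper for padTranspose (cited by its decreasing_by)
theorem pv_sum_tail_le (row : List (List String)) :
    ((row.map List.tail).map List.length).sum ≤ (row.map List.length).sum := by
  induction row with
  | nil => simp
  | cons b t ih => simp only [List.map_cons, List.sum_cons, List.length_tail]; omega

theorem pv_sum_tail_lt (row : List (List String)) (h : ¬ row.all List.isEmpty = true) :
    ((row.map List.tail).map List.length).sum < (row.map List.length).sum := by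
  induction row with
  | nil => simp at h
  | cons b t ih =>
    simp only [List.all_cons, Bool.and_eq_true, List.isEmpty_iff, not_and_or] at h
    simp only [List.map_cons, List.sum_cons, List.length_tail]
    rcases h with h | h
    · have hb : 0 < b.length := List.length_pos_iff.mpr h
      have := pv_sum_tail_le t
      omega
    · have := ih h
      omega

-- while any(row): lines.append([b[0] if b else "" for b in row]); row = [b[1:] for b in row]
def padTranspose (row : List (List String)) : List (List String) :=
  if h : row.all List.isEmpty then []
  else (row.map (fun b => b.headD "")) :: padTranspose (row.map List.tail)
termination_by (row.map List.length).sum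
decreasing_by have h2 := pv_sum_tail_lt row h; simpa using h2

def join_blocks_grid_alt (blocks : List (List String)) (cols : Int) (width : Int) (gap : Int) : List String :=
  let spacer := spacerOf gap
  let out : List String :=
    (PySem.List.pyRange 0 (blocks.length : Int) cols).foldl (fun out r =>
      let out := (padTranspose (PySem.List.slice blocks (some r) (some (r + cols)))).foldl
        (fun out parts => out ++ [PySem.Str.join spacer (parts.map (fun p => pyLjust p width))]) out
      out ++ [""]) []
  trimTrail out

-- ===== PRECONDITION & SPEC =====
-- cols = 0 makes Python's range(0, len(blocks), 0) raise ValueError, so A returns on exactly cols ≠ 0.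
def Pre_join_blocks_grid (blocks : List (List String)) (cols : Int) (width : Int) (gap : Int) : Prop := cols ≠ 0
instance (blocks : List (List String)) (cols : Int) (width : Int) (gap : Int) : Decidable (Pre_join_blocks_grid blocks cols width gap) := by unfold Pre_join_blocks_grid; infer_instance

def pvWitness_join_blocks_grid : List (List String) × Int × Int × Int := ([["ab", "c"], ["x"]], 2, 4, 1)

def Spec_join_blocks_grid (blocks : List (List String)) (cols : Int) (width : Int) (gap : Int) (out : List String) : Prop := out = join_blocks_grid_alt blocks cols width gap
instance (blocks : List (List String)) (cols : Int) (width : Int) (gap : Int) (out : List String) : Decidable (Spec_join_blocks_grid blocks cols width gap out) := by unfold Spec_join_blocks_grid; infer_instance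

-- ===== CLAIM (what is proved, stated in full; the proofs are below) =====
def Claim_equal_join_blocks_grid : Prop := ∀ (blocks : List (List String)) (cols : Int) (width : Int) (gap : Int), Dom_join_blocks_grid blocks cols width gap → Pre_join_blocks_grid blocks cols width gap → Spec_join_blocks_grid blocks cols width gap (join_blocks_grid blocks cols width gap)

-- ===== LEMMAS AND PROOFS =====

-- the running maximum of the block heights in a chunk (Nat form of A's max_h)
def natMaxRow (row : List (List String)) : Nat := row.foldl (fun acc b => max acc b.length) 0

theorem foldl_max_cast (l : List (List String)) (a : Nat) :
    (l.map (fun b => (b.length : Int))).foldl max (a : Int)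
      = ((l.foldl (fun acc b => max acc b.length) a : Nat) : Int) := by
  induction l generalizing a with
  | nil => simp
  | cons b t ih =>
    simp only [List.map_cons, List.foldl_cons]
    rw [← Nat.cast_max, ih]

theorem natMaxRow_cons (x : List String) (t : List (List String)) :
    natMaxRow (x :: t) = t.foldl (fun acc b => max acc b.length) x.length := by
  simp [natMaxRow]

theorem foldl_max_tail (l : List (List String)) (a : Nat) :
    (l.map List.tail).foldl (fun acc b => max acc b.length) (a - 1)
      = (l.foldl (fun acc b => max acc b.length) a) - 1 := by
  induction l generalizing a with
  | nil => simp
  | cons b t ih =>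
    simp only [List.map_cons, List.foldl_cons, List.length_tail]
    rw [show max (a - 1) (b.length - 1) = max a b.length - 1 by omega, ih]

theorem natMaxRow_tail (row : List (List String)) :
    natMaxRow (row.map List.tail) = natMaxRow row - 1 := by
  have := foldl_max_tail row 0
  simpa [natMaxRow] using this

theorem length_le_natMaxRow {row : List (List String)} {b : List String} (hb : b ∈ row) :
    b.length ≤ natMaxRow row :=
  (PySem.List.le_foldl_max_nat row List.length 0).2 b hb

theorem natMaxRow_eq_zero_iff (row : List (List String)) :
    natMaxRow row = 0 ↔ row.all List.isEmpty = true := by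
  constructor
  · intro h
    rw [List.all_eq_true]
    intro b hb
    have hle := length_le_natMaxRow hb
    rw [h] at hle
    rw [List.isEmpty_iff]
    exact List.length_eq_zero_iff.mp (by omega)
  · intro h
    induction row with
    | nil => simp [natMaxRow]
    | cons b t ih =>
      simp only [List.all_cons, Bool.and_eq_true, List.isEmpty_iff] at h
      rw [natMaxRow_cons, h.1]
      simpa [natMaxRow] using ih h.2

theorem padTranspose_eq (n : Nat) : ∀ (row : List (List String)), natMaxRow row = n →
    padTranspose row = (List.range n).map (fun k => row.map (fun b => b.getD k "")) := by
  induction n with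
  | zero =>
    intro row h
    rw [padTranspose.eq_def]
    simp [(natMaxRow_eq_zero_iff row).mp h]
  | succ n ih =>
    intro row h
    have hne : ¬ row.all List.isEmpty = true := by
      intro hall
      rw [← natMaxRow_eq_zero_iff] at hall
      omega
    rw [padTranspose.eq_def, dif_neg hne]
    have htail : natMaxRow (row.map List.tail) = n := by
      rw [natMaxRow_tail, h]
      omega
    rw [ih _ htail, List.range_succ_eq_map, List.map_cons, List.map_map]
    congr 1
    · apply List.map_congr_left
      intro b _
      cases b <;> rfl
    · apply List.map_congr_left
      intro k _
      simp only [Function.comp_apply, List.map_map]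
      apply List.map_congr_left
      intro b _
      cases b <;> rfl

-- A's inner loop over range(max_h) equals B's loop over the padded transpose, on any nonempty chunk.
theorem chunk_eq (spacer : String) (width : Int) (row : List (List String)) (hrow : row ≠ [])
    (out : List String) :
    (PySem.List.pyRange 0
        (match PySem.List.max? (row.map (fun b => (b.length : Int))) (fun x => x) with
          | some m => m
          | none => 0) 1).foldl (fun out i =>
        out ++ [PySem.Str.join spacer (row.map (fun b =>
          pyLjust (if i < (b.length : Int) then PySem.List.pyGetD b i "" else "") width))]) out
    = (padTranspose row).foldl
        (fun out parts => out ++ [PySem.Str.join spacer (parts.map (fun p => pyLjust p width))]) out := by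
  obtain ⟨x, t, rfl⟩ : ∃ x t, row = x :: t := by
    cases row with
    | nil => exact absurd rfl hrow
    | cons x t => exact ⟨x, t, rfl⟩
  have hmax :
      (match PySem.List.max? ((x :: t).map (fun b => (b.length : Int))) (fun x => x) with
        | some m => m
        | none => 0) = (natMaxRow (x :: t) : Int) := by
    rw [List.map_cons, PySem.List.max?_id_cons]
    rw [natMaxRow_cons, foldl_max_cast]
  rw [hmax, PySem.List.foldl_append_singleton_eq_map, PySem.List.foldl_append_singleton_eq_map]
  congr 1
  rw [padTranspose_eq (natMaxRow (x :: t)) _ rfl, PySem.List.pyRange_one]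
  simp only [Int.sub_zero, Int.toNat_natCast, List.map_map]
  apply List.map_congr_left
  intro k _
  simp only [Function.comp_apply, List.map_map]
  congr 1
  apply List.map_congr_left
  intro b _
  simp only [Function.comp_apply, zero_add, PySem.List.pyGetD_natCast]
  congr 1
  by_cases hk : k < b.length
  · simp [hk, Int.ofNat_lt.mpr hk]
  · have : ¬ ((k : Int) < (b.length : Int)) := by exact_mod_cast hk
    rw [if_neg this, List.getD_eq_default _ _ (by omega)]

theorem pyRange_neg_nil (n c : Int) (hn : 0 ≤ n) (hc : c < 0) :
    PySem.List.pyRange 0 n c = [] := by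
  rw [PySem.List.pyRange]
  rw [if_neg (by omega)]
  simp only [if_neg (by omega : ¬ (0:Int) < c), if_neg (by omega : ¬ n < 0)]
  rfl

-- ===== VERDICT (by name: the statement is the Claim_ definition above) =====
theorem join_blocks_grid_spec : Claim_equal_join_blocks_grid := by
  intro blocks cols width gap _dom hpre
  unfold Spec_join_blocks_grid join_blocks_grid join_blocks_grid_alt
  simp only []
  congr 1
  apply PySem.List.foldl_congr_mem
  intro acc r hr
  rcases lt_or_gt_of_ne hpre with hc | hc
  · rw [pyRange_neg_nil _ _ (by positivity) hc] at hr
    simp at hr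
  · have hmem := (PySem.List.mem_pyRange_iff_of_pos hc r).mp hr
    have hrow : PySem.List.slice blocks (some r) (some (r + cols)) ≠ [] := by
      rw [PySem.List.slice_toNat blocks (by omega) (by omega)]
      have h1 : r.toNat < blocks.length := by omega
      have h2 : 1 ≤ (r + cols).toNat - r.toNat := by omega
      intro hnil
      have := congrArg List.length hnil
      simp only [List.length_take, List.length_drop, List.length_nil] at this
      omega
    rw [chunk_eq (spacerOf gap) width _ hrow acc]
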